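-- pv_equiv track=rewrite | github.com/ohzeno/Algo | Programmers/NonCompany/Lv.1/체육복.py | solution
-- ===== SOURCE A (Python) =====
-- def solution(n, lost, reserve):
--     l_set, r_set = set(lost), set(reserve)
--     lost = sorted(l_set - r_set)
--     reserve = sorted(r_set - l_set)
--     lost_cnt = len(lost)
--     for l in lost:
--         for r in reserve:
--             if l - 1 <= r <= l + 1:
--                 reserve.remove(r)
--                 lost_cnt -= 1
--                 break
--     return n - lost_cnt
-- ===== SOURCE B (Python) =====
-- def solution(n, lost, reserve):
--     L = sorted(set(lost) - set(reserve))
--     R = sorted(set(reserve) - set(lost))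
--     i = j = matched = 0
--     while i < len(L) and j < len(R):
--         if R[j] < L[i] - 1:
--             j += 1
--         elif R[j] <= L[i] + 1:
--             matched += 1
--             i += 1
--             j += 1
--         else:
--             i += 1
--     return n - len(L) + matched
-- ===== Notes on version B (the rewrite author's own statement) =====
-- stated objective: faster
-- what changed: Replaces A's per-lost-student inner scan-and-remove of the mutable reserve list by a single two-pointer merge pass over the two sorted disjoint lists, advancing both indices simultaneously and never mutating or re-scanning the reserve.
import Mathlib
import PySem

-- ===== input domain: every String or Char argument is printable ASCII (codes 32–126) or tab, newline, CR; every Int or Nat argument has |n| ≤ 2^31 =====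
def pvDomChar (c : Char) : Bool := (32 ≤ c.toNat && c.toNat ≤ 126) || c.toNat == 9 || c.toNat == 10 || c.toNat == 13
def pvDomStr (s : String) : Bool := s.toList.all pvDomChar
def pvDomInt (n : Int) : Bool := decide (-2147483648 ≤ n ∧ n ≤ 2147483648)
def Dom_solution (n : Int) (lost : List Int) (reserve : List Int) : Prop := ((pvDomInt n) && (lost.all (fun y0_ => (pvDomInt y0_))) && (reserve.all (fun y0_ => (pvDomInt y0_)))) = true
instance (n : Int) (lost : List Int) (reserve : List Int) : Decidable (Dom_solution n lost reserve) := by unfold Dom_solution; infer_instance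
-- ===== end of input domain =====

-- B replaces A's per-lost-student inner scan-and-remove of the mutable reserve list by a
-- single two-pointer merge pass over the two sorted disjoint lists; objective: faster.

-- ===== PORT A =====
-- inner 'for r in reserve: if l-1 <= r <= l+1: reserve.remove(r); break':
-- returns the reserve list after removing the first in-window element, or none if no break fired
def solInner (l : Int) : List Int → Option (List Int)
  | [] => none
  | r :: rest =>
    if l - 1 ≤ r ∧ r ≤ l + 1 then some rest
    else (solInner l rest).map (fun t => r :: t)

-- outer 'for l in lost' carrying the mutable reserve list and lost_cnt
def solOuter : List Int → List Int → Int → Int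
  | [], _, cnt => cnt
  | l :: ls, res, cnt =>
    match solInner l res with
    | some res' => solOuter ls res' (cnt - 1)
    | none => solOuter ls res cnt

def solution (n : Int) (lost : List Int) (reserve : List Int) : Int :=
  let lset : PySem.Set Int := PySem.Set.ofList lost
  let rset : PySem.Set Int := PySem.Set.ofList reserve
  let lost' := PySem.List.sorted (PySem.Set.diff lset rset) (fun x => x) false
  let reserve' := PySem.List.sorted (PySem.Set.diff rset lset) (fun x => x) false
  n - solOuter lost' reserve' (lost'.length : Int)

-- ===== PORT B =====
-- the 'while i < len(L) and j < len(R)' two-pointer loop, consuming both sorted lists;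
-- returns the number of matched lost students
def tpLoop : List Int → List Int → Int
  | [], _ => 0
  | _ :: _, [] => 0
  | l :: ls, r :: rs =>
    if r < l - 1 then tpLoop (l :: ls) rs
    else if r ≤ l + 1 then 1 + tpLoop ls rs
    else tpLoop ls (r :: rs)
termination_by L R => L.length + R.length
decreasing_by all_goals (simp_all; try omega)

def solution_alt (n : Int) (lost : List Int) (reserve : List Int) : Int :=
  let L := PySem.List.sorted (PySem.Set.diff (PySem.Set.ofList lost) (PySem.Set.ofList reserve)) (fun x => x) false
  let R := PySem.List.sorted (PySem.Set.diff (PySem.Set.ofList reserve) (PySem.Set.ofList lost)) (fun x => x) false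
  n - (L.length : Int) + tpLoop L R

-- ===== PRECONDITION & SPEC =====
def Spec_solution (n : Int) (lost : List Int) (reserve : List Int) (out : Int) : Prop := out = solution_alt n lost reserve
instance (n : Int) (lost : List Int) (reserve : List Int) (out : Int) : Decidable (Spec_solution n lost reserve out) := by unfold Spec_solution; infer_instance

-- ===== CLAIM (what is proved, stated in full; the proofs are below) =====
def Claim_equal_solution : Prop := ∀ (n : Int) (lost : List Int) (reserve : List Int), Dom_solution n lost reserve → Spec_solution n lost reserve (solution n lost reserve)

-- ===== LEMMAS AND PROOFS =====

theorem solOuter_nil_res : ∀ (L : List Int) (cnt : Int), solOuter L [] cnt = cnt := by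
  intro L
  induction L with
  | nil => intro cnt; simp [solOuter]
  | cons l ls ih => intro cnt; simp [solOuter, solInner, ih]

theorem solInner_none (l : Int) : ∀ (res : List Int), (∀ x ∈ res, l + 1 < x) → solInner l res = none := by
  intro res
  induction res with
  | nil => intro _; simp [solInner]
  | cons r rest ih =>
    intro h
    have hr := h r List.mem_cons_self
    have hw : ¬ (l - 1 ≤ r ∧ r ≤ l + 1) := by omega
    show (if l - 1 ≤ r ∧ r ≤ l + 1 then some rest else (solInner l rest).map (fun t => r :: t)) = none
    rw [if_neg hw, ih (fun x hx => h x (List.mem_cons_of_mem _ hx))]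
    rfl

-- an element below every window can be dropped from the reserve without changing A's loop
theorem solOuter_drop (r : Int) : ∀ (L res : List Int) (cnt : Int),
    (∀ l ∈ L, ¬ (l - 1 ≤ r ∧ r ≤ l + 1)) → solOuter L (r :: res) cnt = solOuter L res cnt := by
  intro L
  induction L with
  | nil => intro res cnt _; simp [solOuter]
  | cons l ls ih =>
    intro res cnt h
    have hl : ¬ (l - 1 ≤ r ∧ r ≤ l + 1) := h l List.mem_cons_self
    have hls : ∀ x ∈ ls, ¬ (x - 1 ≤ r ∧ r ≤ x + 1) := fun x hx => h x (List.mem_cons_of_mem _ hx)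
    have hskip : solInner l (r :: res) = (solInner l res).map (fun t => r :: t) := by
      show (if l - 1 ≤ r ∧ r ≤ l + 1 then some res else (solInner l res).map (fun t => r :: t)) = _
      rw [if_neg hl]
    cases hres : solInner l res with
    | none => simp [solOuter, hskip, hres, ih res cnt hls]
    | some res' => simp [solOuter, hskip, hres, ih res' (cnt - 1) hls]

-- main correspondence: A's greedy over sorted disjoint lists counts exactly the
-- two-pointer matches
theorem outer_eq_tp : ∀ (L R : List Int), ∀ (cnt : Int),
    L.Pairwise (· < ·) → R.Pairwise (· < ·) → (∀ l ∈ L, l ∉ R) →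
    solOuter L R cnt = cnt - tpLoop L R := by
  intro L R
  induction L, R using tpLoop.induct with
  | case1 R => intro cnt _ _ _; simp [solOuter, tpLoop]
  | case2 l ls => intro cnt _ _ _; simp [solOuter_nil_res, tpLoop]
  | case3 l ls r rs h ih =>
    intro cnt hL hR hdisj
    have hgt : ∀ y ∈ rs, r < y := (List.pairwise_cons.mp hR).1
    have hout : ∀ l' ∈ l :: ls, ¬ (l' - 1 ≤ r ∧ r ≤ l' + 1) := by
      intro l' hl'
      rcases List.mem_cons.mp hl' with h1 | h2
      · omega
      · have := (List.pairwise_cons.mp hL).1 l' h2; omega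
    have hdisj' : ∀ l' ∈ l :: ls, l' ∉ rs := fun l' hl' hc =>
      hdisj l' hl' (List.mem_cons_of_mem _ hc)
    rw [solOuter_drop r (l :: ls) rs cnt hout,
        ih cnt hL (List.pairwise_cons.mp hR).2 hdisj']
    rw [show tpLoop (l :: ls) (r :: rs) = tpLoop (l :: ls) rs by
      rw [tpLoop]; simp [h]]
  | case4 l ls r rs h1 h2 ih =>
    intro cnt hL hR hdisj
    have hlr : l ≠ r := fun hc => hdisj l List.mem_cons_self (hc ▸ List.mem_cons_self)
    have hwin : l - 1 ≤ r ∧ r ≤ l + 1 := by omega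
    have hdisj' : ∀ l' ∈ ls, l' ∉ rs := fun l' hl' hc =>
      hdisj l' (List.mem_cons_of_mem _ hl') (List.mem_cons_of_mem _ hc)
    have : solOuter (l :: ls) (r :: rs) cnt = solOuter ls rs (cnt - 1) := by
      simp [solOuter, solInner, hwin]
    rw [this, ih (cnt - 1) (List.pairwise_cons.mp hL).2 (List.pairwise_cons.mp hR).2 hdisj']
    rw [show tpLoop (l :: ls) (r :: rs) = 1 + tpLoop ls rs by
      rw [tpLoop]; simp [h1, h2]]
    ring
  | case5 l ls r rs h1 h2 ih =>
    intro cnt hL hR hdisj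
    have hgt : ∀ y ∈ rs, r < y := (List.pairwise_cons.mp hR).1
    have hnone : solInner l (r :: rs) = none := by
      apply solInner_none
      intro x hx
      rcases List.mem_cons.mp hx with hc | hc
      · omega
      · have := hgt x hc; omega
    have hdisj' : ∀ l' ∈ ls, l' ∉ r :: rs := fun l' hl' => hdisj l' (List.mem_cons_of_mem _ hl')
    have : solOuter (l :: ls) (r :: rs) cnt = solOuter ls (r :: rs) cnt := by
      simp [solOuter, hnone]
    rw [this, ih cnt (List.pairwise_cons.mp hL).2 hR hdisj']
    rw [show tpLoop (l :: ls) (r :: rs) = tpLoop ls (r :: rs) by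
      rw [tpLoop]; simp [h1, h2]]

-- a sorted duplicate-free diff is strictly increasing
theorem sorted_diff_strict (a b : List Int) :
    (PySem.List.sorted (PySem.Set.diff (PySem.Set.ofList a) (PySem.Set.ofList b)) (fun x => x) false).Pairwise (· < ·) := by
  have hperm := PySem.List.sorted_perm (PySem.Set.diff (PySem.Set.ofList a) (PySem.Set.ofList b)) (fun x : Int => x) false
  have hnodup : (PySem.List.sorted (PySem.Set.diff (PySem.Set.ofList a) (PySem.Set.ofList b)) (fun x : Int => x) false).Nodup :=
    hperm.nodup_iff.mpr (PySem.Set.nodup_diff _ _ (PySem.Set.nodup_ofList a))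
  have hle := PySem.List.sorted_pairwise (PySem.Set.diff (PySem.Set.ofList a) (PySem.Set.ofList b)) (fun x : Int => x)
  exact (hle.and hnodup).imp (fun h => lt_of_le_of_ne h.1 h.2)

-- ===== VERDICT (by name: the statement is the Claim_ definition above) =====
theorem solution_spec : Claim_equal_solution := by
  intro n lost reserve _
  unfold Spec_solution solution solution_alt
  show n - solOuter
        (PySem.List.sorted (PySem.Set.diff (PySem.Set.ofList lost) (PySem.Set.ofList reserve)) (fun x => x) false)
        (PySem.List.sorted (PySem.Set.diff (PySem.Set.ofList reserve) (PySem.Set.ofList lost)) (fun x => x) false)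
        ((PySem.List.sorted (PySem.Set.diff (PySem.Set.ofList lost) (PySem.Set.ofList reserve)) (fun x => x) false).length : Int)
      = n - ((PySem.List.sorted (PySem.Set.diff (PySem.Set.ofList lost) (PySem.Set.ofList reserve)) (fun x => x) false).length : Int)
        + tpLoop (PySem.List.sorted (PySem.Set.diff (PySem.Set.ofList lost) (PySem.Set.ofList reserve)) (fun x => x) false)
            (PySem.List.sorted (PySem.Set.diff (PySem.Set.ofList reserve) (PySem.Set.ofList lost)) (fun x => x) false)
  set L : List Int := PySem.List.sorted (PySem.Set.diff (PySem.Set.ofList lost) (PySem.Set.ofList reserve)) (fun x => x) false with hL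
  set R : List Int := PySem.List.sorted (PySem.Set.diff (PySem.Set.ofList reserve) (PySem.Set.ofList lost)) (fun x => x) false with hR
  have hLp : L.Pairwise (· < ·) := sorted_diff_strict lost reserve
  have hRp : R.Pairwise (· < ·) := sorted_diff_strict reserve lost
  have hdisj : ∀ l ∈ L, l ∉ R := by
    intro l hlmem hc
    have hl1 := (PySem.List.mem_sorted _ (fun x : Int => x) false l).mp hlmem
    have hl2 := (PySem.List.mem_sorted _ (fun x : Int => x) false l).mp hc
    have h1 := (PySem.Set.mem_diff (PySem.Set.ofList lost) (PySem.Set.ofList reserve) l).mp hl1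
    have h2 := (PySem.Set.mem_diff (PySem.Set.ofList reserve) (PySem.Set.ofList lost) l).mp hl2
    exact h2.2 h1.1
  rw [outer_eq_tp L R (L.length : Int) hLp hRp hdisj]
  ring
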